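-- pv_equiv track=rewrite | github.com/MiuLab/VisualDialog | utils/data/data_processor.py | get_keys_for_json_format_prompts
-- ===== SOURCE A (Python) =====
-- def get_keys_for_json_format_prompts(reply):
--     lines = reply.split('\n')
--     key_lines = []
--
--     for line in lines:
--         if line.startswith("- "):
--             key_lines.append(line)
--         elif len(key_lines):
--             break
--
--     keys = [line.strip().split(':')[0].replace("- ", "") for line in key_lines]
--
--     return keys
-- ===== SOURCE B (Python) =====
-- def get_keys_for_json_format_prompts(reply):
--     lines = reply.split('\n')
--     # phase 1: drop leading lines that are not dash items
--     rest = lines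
--     while rest and not rest[0].startswith("- "):
--         rest = rest[1:]
--     # phase 2: take the first contiguous block of dash items
--     block = []
--     while rest and rest[0].startswith("- "):
--         block.append(rest[0])
--         rest = rest[1:]
--     return [line.strip().split(':')[0].replace("- ", "") for line in block]
-- ===== Notes on version B (the rewrite author's own statement) =====
-- stated objective: alternative
-- what changed: Replaces A's single stateful collect-loop with conditional break by a two-phase scan: drop the leading non-dash lines, then take the first contiguous dash block, then map the same key extraction.
import Mathlib
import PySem

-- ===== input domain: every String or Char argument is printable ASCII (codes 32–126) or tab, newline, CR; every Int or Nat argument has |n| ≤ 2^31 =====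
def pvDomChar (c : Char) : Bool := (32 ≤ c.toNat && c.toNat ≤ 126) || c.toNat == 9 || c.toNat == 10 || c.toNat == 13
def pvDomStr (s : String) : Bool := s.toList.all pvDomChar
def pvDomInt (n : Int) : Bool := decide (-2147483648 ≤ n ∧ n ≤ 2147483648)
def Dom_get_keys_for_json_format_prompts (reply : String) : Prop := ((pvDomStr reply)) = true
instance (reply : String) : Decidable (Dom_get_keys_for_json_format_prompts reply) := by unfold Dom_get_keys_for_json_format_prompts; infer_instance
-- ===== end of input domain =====

-- B replaces A's single stateful collect-loop (with conditional break) by a two-phase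
-- drop-then-take scan over the lines; same key extraction, same cost (objective: alternative).


-- ===== PORT A =====
-- line.strip().split(':')[0].replace("- ", "")   (split(':') is never empty, so [0] is its head)
def pvKeyOf (line : String) : String :=
  PySem.Str.replace (((PySem.Str.split? (PySem.Str.strip line) ":").getD []).headD "") "- " ""

-- A's for-loop: append dash lines, break at the first non-dash line once key_lines is nonempty
def pvCollectA (lines : List String) (key_lines : List String) : List String :=
  match lines with
  | [] => key_lines
  | line :: rest =>
      if PySem.Str.startswith line "- " then pvCollectA rest (key_lines ++ [line])
      else if key_lines.length ≠ 0 then key_lines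
      else pvCollectA rest key_lines

def get_keys_for_json_format_prompts (reply : String) : List String :=
  (pvCollectA ((PySem.Str.split? reply "\n").getD []) []).map pvKeyOf

-- ===== PORT B =====
-- phase 1: while rest and not rest[0].startswith("- "): rest = rest[1:]
def pvDropNonDash (rest : List String) : List String :=
  match rest with
  | [] => []
  | line :: tail =>
      if ¬ (PySem.Str.startswith line "- " = true) then pvDropNonDash tail else line :: tail

-- phase 2: while rest and rest[0].startswith("- "): block.append(rest[0]); rest = rest[1:]
def pvTakeDash (rest : List String) : List String :=
  match rest with
  | [] => []
  | line :: tail =>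
      if PySem.Str.startswith line "- " then line :: pvTakeDash tail else []

def get_keys_for_json_format_prompts_alt (reply : String) : List String :=
  (pvTakeDash (pvDropNonDash ((PySem.Str.split? reply "\n").getD []))).map pvKeyOf

-- ===== PRECONDITION & SPEC =====
def Spec_get_keys_for_json_format_prompts (reply : String) (out : List String) : Prop := out = get_keys_for_json_format_prompts_alt reply
instance (reply : String) (out : List String) : Decidable (Spec_get_keys_for_json_format_prompts reply out) := by unfold Spec_get_keys_for_json_format_prompts; infer_instance

-- ===== CLAIM (what is proved, stated in full; the proofs are below) =====
def Claim_equal_get_keys_for_json_format_prompts : Prop := ∀ (reply : String), Dom_get_keys_for_json_format_prompts reply → Spec_get_keys_for_json_format_prompts reply (get_keys_for_json_format_prompts reply)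

-- ===== LEMMAS AND PROOFS =====
-- once key_lines is nonempty, A's loop just takes the remaining dash prefix
theorem pvCollectA_nonempty (lines : List String) (acc : List String) (h : acc ≠ []) :
    pvCollectA lines acc = acc ++ pvTakeDash lines := by
  induction lines generalizing acc with
  | nil => simp [pvCollectA, pvTakeDash]
  | cons line rest ih =>
      simp only [pvCollectA, pvTakeDash]
      by_cases hs : PySem.Chars.startswith line.toList ['-', ' '] = true
      · simp [hs, ih (acc ++ [line]) (by simp)]
      · simp [hs, List.length_eq_zero_iff, h]

theorem pvCollectA_nil (lines : List String) :
    pvCollectA lines [] = pvTakeDash (pvDropNonDash lines) := by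
  induction lines with
  | nil => rfl
  | cons line rest ih =>
      simp only [pvCollectA, pvDropNonDash]
      by_cases hs : PySem.Chars.startswith line.toList ['-', ' '] = true
      · simp [hs, pvCollectA_nonempty rest [line] (by simp), pvTakeDash]
      · simp [hs, ih]

-- ===== VERDICT (by name: the statement is the Claim_ definition above) =====
theorem get_keys_for_json_format_prompts_spec : Claim_equal_get_keys_for_json_format_prompts := by
  intro reply _
  unfold Spec_get_keys_for_json_format_prompts get_keys_for_json_format_prompts
    get_keys_for_json_format_prompts_alt
  rw [pvCollectA_nil]
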